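-- pv_equiv track=rewrite | github.com/seungalee/Algorithm-study | 프로그래머스 lv2/n^2배열자르기.py | solution
-- ===== SOURCE A (Python) =====
-- def solution(n, left, right):
--     answer = []
--     for i in range(left, right+1):
--         column = (i // n) + 1
--         row = i % n + 1
--         if row <= column:
--             answer.append(column)
--         else:
--             answer.append(row)
--
--     return answer
-- ===== SOURCE B (Python) =====
-- def solution(n, left, right):
--     answer = []
--     r0 = left // n
--     r1 = right // n
--     for r in range(r0, r1 + 1):
--         c_start = left - r * n if r == r0 else 0
--         c_end = right - r * n if r == r1 else n - 1
--         const_hi = min(r, c_end)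
--         if const_hi >= c_start:
--             answer.extend([r + 1] * (const_hi - c_start + 1))
--         asc_lo = max(c_start, r + 1)
--         answer.extend(range(asc_lo + 1, c_end + 2))
--     return answer
-- ===== Notes on version B (the rewrite author's own statement) =====
-- stated objective: alternative
-- what changed: B replaces A's per-flat-index loop (one floordiv, one mod and a comparison per element) by a per-row loop that emits each spanned row's segment in bulk as a constant block [r+1]*k followed by an ascending range, exploiting the row structure of the n x n max(row,col)+1 matrix.
-- outside the precondition, e.g. on solution(-3, 0, 2): A returns [1, 0, 0], B returns []
import Mathlib
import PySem

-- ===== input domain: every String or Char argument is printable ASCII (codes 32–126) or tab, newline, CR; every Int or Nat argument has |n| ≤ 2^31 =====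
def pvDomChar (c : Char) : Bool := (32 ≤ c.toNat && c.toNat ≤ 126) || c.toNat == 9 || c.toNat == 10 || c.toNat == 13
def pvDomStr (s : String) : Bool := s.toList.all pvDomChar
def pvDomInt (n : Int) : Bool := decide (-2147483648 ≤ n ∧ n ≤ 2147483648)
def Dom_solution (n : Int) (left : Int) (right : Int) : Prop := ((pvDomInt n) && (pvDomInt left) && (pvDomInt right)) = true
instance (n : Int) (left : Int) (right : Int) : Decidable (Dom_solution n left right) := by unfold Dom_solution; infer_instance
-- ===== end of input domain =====

-- B replaces A's per-flat-index loop by a per-row loop emitting each row's constant block and ascending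
-- tail as bulk segments (objective: alternative decomposition exploiting the row structure).


-- ===== PORT A =====
def solution (n : Int) (left : Int) (right : Int) : List Int :=
  (PySem.List.pyRange left (right + 1) 1).foldl
    (fun answer i =>
      let column := PySem.Int.floordiv i n + 1
      let row := PySem.Int.mod i n + 1
      if row ≤ column then answer ++ [column] else answer ++ [row]) []

-- ===== PORT B =====
-- loop body of Source B's per-row loop (r0, r1 passed in; answer is the accumulator)
def solBodyB (n left right r0 r1 : Int) (answer : List Int) (r : Int) : List Int :=
  let cStart := if r = r0 then left - r * n else 0
  let cEnd := if r = r1 then right - r * n else n - 1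
  let constHi := min r cEnd
  let answer := if constHi ≥ cStart then answer ++ List.replicate (constHi - cStart + 1).toNat (r + 1) else answer
  let ascLo := max cStart (r + 1)
  answer ++ PySem.List.pyRange (ascLo + 1) (cEnd + 2) 1

def solution_alt (n : Int) (left : Int) (right : Int) : List Int :=
  let r0 := PySem.Int.floordiv left n
  let r1 := PySem.Int.floordiv right n
  (PySem.List.pyRange r0 (r1 + 1) 1).foldl (solBodyB n left right r0 r1) []

-- ===== PRECONDITION & SPEC =====
-- Pre_ excludes n ≤ 0: A raises ZeroDivisionError at n = 0, and a non-positive matrix size n < 0 is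
-- outside the problem's natural domain (A's values there are accidents of Python floor division).
def Pre_solution (n : Int) (left : Int) (right : Int) : Prop := 1 ≤ n
instance (n : Int) (left : Int) (right : Int) : Decidable (Pre_solution n left right) := by unfold Pre_solution; infer_instance
def pvWitness_solution : Int × Int × Int := (3, 2, 5)
def Spec_solution (n : Int) (left : Int) (right : Int) (out : List Int) : Prop := out = solution_alt n left right
instance (n : Int) (left : Int) (right : Int) (out : List Int) : Decidable (Spec_solution n left right out) := by unfold Spec_solution; infer_instance

-- ===== CLAIM (what is proved, stated in full; the proofs are below) =====
def Claim_equal_solution : Prop := ∀ (n : Int) (left : Int) (right : Int), Dom_solution n left right → Pre_solution n left right → Spec_solution n left right (solution n left right)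

-- ===== LEMMAS AND PROOFS =====

-- the value A appends at flat index i
def aVal (n i : Int) : Int :=
  if PySem.Int.mod i n + 1 ≤ PySem.Int.floordiv i n + 1 then PySem.Int.floordiv i n + 1
  else PySem.Int.mod i n + 1

theorem solution_eq_map (n left right : Int) :
    solution n left right = (PySem.List.pyRange left (right + 1) 1).map (aVal n) := by
  have hbody : (fun (answer : List Int) (i : Int) =>
      let column := PySem.Int.floordiv i n + 1
      let row := PySem.Int.mod i n + 1
      if row ≤ column then answer ++ [column] else answer ++ [row])
      = fun (answer : List Int) (i : Int) => answer ++ [aVal n i] := by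
    funext answer i
    simp only [aVal]
    split <;> rfl
  simp only [solution, hbody]
  simpa using PySem.List.foldl_append_singleton_eq_map (aVal n) (PySem.List.pyRange left (right + 1) 1) []

theorem floordiv_row (n r c : Int) (hn : 1 ≤ n) (hc0 : 0 ≤ c) (hcn : c < n) :
    PySem.Int.floordiv (r * n + c) n = r := by
  rw [PySem.Int.floordiv_eq_iff_of_pos (by omega)]
  constructor <;> nlinarith

theorem mod_row (n r c : Int) (hn : 1 ≤ n) (hc0 : 0 ≤ c) (hcn : c < n) :
    PySem.Int.mod (r * n + c) n = c := by
  have h := PySem.Int.floordiv_mul_add_mod (r * n + c) n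
  rw [floordiv_row n r c hn hc0 hcn] at h
  omega

theorem aVal_row (n r c : Int) (hn : 1 ≤ n) (hc0 : 0 ≤ c) (hcn : c < n) :
    aVal n (r * n + c) = if c ≤ r then r + 1 else c + 1 := by
  simp only [aVal, floordiv_row n r c hn hc0 hcn, mod_row n r c hn hc0 hcn]
  split_ifs <;> omega

-- one row's emitted segment (as in solBodyB with accumulator [])
def rowSeg (n r cs ce : Int) : List Int :=
  (if min r ce ≥ cs then List.replicate (min r ce - cs + 1).toNat (r + 1) else []) ++
    PySem.List.pyRange (max cs (r + 1) + 1) (ce + 2) 1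

theorem rowSeg_eq_map (n r : Int) (hn : 1 ≤ n) :
    ∀ (k : Nat) (cs ce : Int), 0 ≤ cs → ce ≤ n - 1 → (ce + 1 - cs).toNat ≤ k →
      rowSeg n r cs ce = (PySem.List.pyRange (r * n + cs) (r * n + ce + 1) 1).map (aVal n) := by
  intro k
  induction k with
  | zero =>
    intro cs ce hcs hce hk
    have hlt : ce < cs := by omega
    rw [rowSeg, if_neg (by omega), PySem.List.pyRange_one_eq_nil (by omega),
      PySem.List.pyRange_one_eq_nil (by omega)]
    simp
  | succ k ih =>
    intro cs ce hcs hce hk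
    by_cases hcec : ce < cs
    · rw [rowSeg, if_neg (by omega), PySem.List.pyRange_one_eq_nil (by omega),
        PySem.List.pyRange_one_eq_nil (by omega)]
      simp
    · rw [not_lt] at hcec
      have htail := ih (cs + 1) ce (by omega) hce (by omega)
      have hhead : PySem.List.pyRange (r * n + cs) (r * n + ce + 1) 1
          = (r * n + cs) :: PySem.List.pyRange (r * n + cs + 1) (r * n + ce + 1) 1 := by
        rw [PySem.List.pyRange_one_cons (by omega)]
      have hv : aVal n (r * n + cs) = if cs ≤ r then r + 1 else cs + 1 :=
        aVal_row n r cs hn hcs (by omega)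
      rw [hhead]
      simp only [List.map_cons, hv]
      rw [show r * n + cs + 1 = r * n + (cs + 1) by ring, ← htail]
      by_cases hcr : cs ≤ r
      · -- head comes from the constant block
        have hmin : cs ≤ min r ce := by omega
        rw [rowSeg, if_pos (by omega)]
        have hrepl : (min r ce - cs + 1).toNat = (min r ce - (cs + 1) + 1).toNat + 1 := by omega
        rw [hrepl, List.replicate_succ]
        rw [rowSeg]
        have hmax : max cs (r + 1) = max (cs + 1) (r + 1) := by omega
        rw [if_pos hcr, hmax]
        by_cases hmin1 : min r ce ≥ cs + 1
        · rw [if_pos hmin1]; simp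
        · rw [if_neg hmin1]
          have : (min r ce - (cs + 1) + 1).toNat = 0 := by omega
          rw [this]; simp
      · -- head comes from the ascending range
        rw [not_le] at hcr
        have hmax : max cs (r + 1) = cs := by omega
        have hmax1 : max (cs + 1) (r + 1) = cs + 1 := by omega
        rw [rowSeg, rowSeg, if_neg (by omega : ¬ min r ce ≥ cs),
          if_neg (by omega : ¬ min r ce ≥ cs + 1), hmax, hmax1,
          PySem.List.pyRange_one_cons (by omega : cs + 1 < ce + 2),
          if_neg (by omega : ¬ cs ≤ r)]
        simp

theorem solBodyB_eq (n left right r0 r1 : Int) (answer : List Int) (r : Int) :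
    solBodyB n left right r0 r1 answer r
      = answer ++ rowSeg n r (if r = r0 then left - r * n else 0)
          (if r = r1 then right - r * n else n - 1) := by
  simp only [solBodyB, rowSeg]
  split_ifs <;> simp

theorem solution_alt_eq_map (n : Int) (hn : 1 ≤ n) :
    ∀ (k : Nat) (left right : Int),
      (PySem.Int.floordiv right n - PySem.Int.floordiv left n + 1).toNat ≤ k →
      solution_alt n left right = (PySem.List.pyRange left (right + 1) 1).map (aVal n) := by
  intro k
  induction k with
  | zero =>
    intro left right hk
    have h1 : PySem.Int.floordiv right n < PySem.Int.floordiv left n := by omega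
    have h2 : right < left := by
      by_contra h
      rw [not_lt] at h
      have := Int.ediv_le_ediv (by omega : (0:Int) < n) h
      rw [← PySem.Int.floordiv_eq_ediv_of_pos (by omega),
        ← PySem.Int.floordiv_eq_ediv_of_pos (by omega)] at this
      omega
    rw [solution_alt]
    simp only [PySem.List.pyRange_one_eq_nil (by omega : PySem.Int.floordiv right n + 1 ≤ PySem.Int.floordiv left n)]
    rw [PySem.List.pyRange_one_eq_nil (by omega)]
    simp
  | succ k ih =>
    intro left right hk
    set r0 := PySem.Int.floordiv left n with hr0
    set r1 := PySem.Int.floordiv right n with hr1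
    have hl0 : r0 * n ≤ left ∧ left < (r0 + 1) * n := by
      constructor
      · rw [hr0, ← PySem.Int.le_floordiv_iff_mul_le (by omega)]
      · rw [hr0, ← PySem.Int.floordiv_lt_iff_lt_mul (by omega)]; omega
    have hr0b : r1 * n ≤ right ∧ right < (r1 + 1) * n := by
      constructor
      · rw [hr1, ← PySem.Int.le_floordiv_iff_mul_le (by omega)]
      · rw [hr1, ← PySem.Int.floordiv_lt_iff_lt_mul (by omega)]; omega
    by_cases hlt : r1 < r0
    · have h2 : right < left := by
        by_contra h
        rw [not_lt] at h
        have := Int.ediv_le_ediv (by omega : (0:Int) < n) h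
        rw [← PySem.Int.floordiv_eq_ediv_of_pos (by omega),
          ← PySem.Int.floordiv_eq_ediv_of_pos (by omega)] at this
        omega
      rw [solution_alt]
      simp only [← hr0, ← hr1]
      rw [PySem.List.pyRange_one_eq_nil (by omega), PySem.List.pyRange_one_eq_nil (by omega)]
      simp
    · rw [not_lt] at hlt
      by_cases heq : r1 = r0
      · -- single row
        rw [solution_alt]
        simp only [← hr0, ← hr1, heq]
        rw [PySem.List.pyRange_one_singleton]
        simp only [List.foldl_cons, List.foldl_nil]
        rw [solBodyB_eq, if_pos rfl, if_pos rfl]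
        have hx : (r0 + 1) * n = r0 * n + n := by ring
        rw [heq] at hr0b
        rw [List.nil_append,
          rowSeg_eq_map n r0 hn (right + 1 - left).toNat (left - r0 * n) (right - r0 * n)
            (by omega) (by omega) (by omega)]
        have : r0 * n + (left - r0 * n) = left := by ring
        rw [this, show r0 * n + (right - r0 * n) + 1 = right + 1 by ring]
      · -- at least two rows: peel the last one
        have hlt' : r0 < r1 := by omega
        have hmid : r0 * n < r1 * n ∧ (r0 + 1) * n ≤ r1 * n := by
          constructor <;> nlinarith
        have hprev : PySem.Int.floordiv (r1 * n - 1) n = r1 - 1 := by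
          rw [PySem.Int.floordiv_eq_iff_of_pos (by omega)]
          constructor <;> nlinarith
        have hihres := ih left (r1 * n - 1) (by rw [hprev, ← hr0]; omega)
        rw [solution_alt]
        simp only [← hr0, ← hr1]
        rw [PySem.List.pyRange_one_succ_right (by omega : r0 ≤ r1), List.foldl_append]
        have hcongr : (PySem.List.pyRange r0 r1 1).foldl (solBodyB n left right r0 r1) []
            = (PySem.List.pyRange r0 r1 1).foldl (solBodyB n left (r1 * n - 1) r0 (r1 - 1)) [] := by
          apply PySem.List.foldl_congr_mem
          intro acc r hr
          rw [PySem.List.mem_pyRange_one] at hr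
          rw [solBodyB_eq, solBodyB_eq]
          have h1 : (if r = r1 then right - r * n else n - 1)
              = (if r = r1 - 1 then r1 * n - 1 - r * n else n - 1) := by
            split_ifs <;> first | omega | nlinarith
          rw [h1]
        have hinner : (PySem.List.pyRange r0 r1 1).foldl (solBodyB n left (r1 * n - 1) r0 (r1 - 1)) []
            = solution_alt n left (r1 * n - 1) := by
          rw [solution_alt]
          simp only [← hr0, hprev]
          rw [show r1 - 1 + 1 = r1 by ring]
        rw [hcongr, hinner, List.foldl_cons, List.foldl_nil, hihres]
        rw [solBodyB_eq, if_neg (by omega), if_pos rfl]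
        have hx1 : (r1 + 1) * n = r1 * n + n := by ring
        rw [rowSeg_eq_map n r1 hn (right - r1 * n + 1).toNat 0 (right - r1 * n) le_rfl (by omega) (by omega)]
        rw [show r1 * n - 1 + 1 = r1 * n from by ring, show r1 * n + 0 = r1 * n from by ring,
          show r1 * n + (right - r1 * n) + 1 = right + 1 from by ring]
        rw [← List.map_append, ← PySem.List.pyRange_one_append left (r1 * n) (right + 1) (by omega) (by omega)]

-- ===== VERDICT (by name: the statement is the Claim_ definition above) =====
theorem solution_spec : Claim_equal_solution := by
  intro n left right _ hpre
  unfold Spec_solution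
  rw [solution_eq_map,
    solution_alt_eq_map n hpre (PySem.Int.floordiv right n - PySem.Int.floordiv left n + 1).toNat left right le_rfl]
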